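-- pv_equiv track=rewrite | github.com/algorithm-studyy/algorithm | jiwon/programmers/different_bit_2_bit_below.py | solution
-- ===== SOURCE A (Python) =====
-- def make_binary(number):
--     result = []
--     a = -1
--     while number > 0:
--         if a == -1 and number % 2 == 0:
--             a = len(result)
--         result.append(str(number % 2))
--         number //= 2
--     if a == -1:
--         result[-1] = '0'
--         result.append('1')
--     else:
--         result[a] = '1'
--         result[a - 1] = '0'
--     return ''.join(result[::-1])
--
-- def solution(numbers):
--     answer = []
--     for n in numbers:
--         if n % 2 == 0:
--             answer.append(n + 1)
--         else:
--             b = make_binary(n)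
--             answer.append(int(b, 2))
--     return answer
-- ===== SOURCE B (Python) =====
-- def solution(numbers):
--     # closed-form bit arithmetic instead of building/mutating a binary string:
--     # for odd n, n ^ (n+1) is a mask of the bits up to and including the lowest
--     # zero bit, so ((n ^ (n+1)) + 1) >> 2 is exactly 2**(z-1) where z is the
--     # position of the lowest zero bit -- the same value A adds via its string surgery.
--     return [n + 1 if n % 2 == 0 else n + (((n ^ (n + 1)) + 1) >> 2) for n in numbers]
-- ===== Notes on version B (the rewrite author's own statement) =====
-- stated objective: simpler
-- what changed: For odd n, A builds the binary digit string of n, scans it for the lowest zero bit, mutates two digit characters and re-parses the string with int(b,2); B replaces all of that with the closed-form bit identity n + (((n ^ (n+1)) + 1) >> 2), which adds the same 2**(z-1) (z = lowest zero bit) without any string construction.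
import Mathlib
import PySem

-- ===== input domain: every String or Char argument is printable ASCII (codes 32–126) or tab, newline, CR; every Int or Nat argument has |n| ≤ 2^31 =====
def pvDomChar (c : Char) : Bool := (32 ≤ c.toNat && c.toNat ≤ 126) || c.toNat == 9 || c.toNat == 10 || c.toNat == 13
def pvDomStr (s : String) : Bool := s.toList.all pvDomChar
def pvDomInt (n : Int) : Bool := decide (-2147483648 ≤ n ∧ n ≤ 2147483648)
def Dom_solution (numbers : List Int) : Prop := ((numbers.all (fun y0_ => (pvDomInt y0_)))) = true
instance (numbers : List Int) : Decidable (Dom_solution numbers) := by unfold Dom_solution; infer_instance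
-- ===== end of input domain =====

-- B replaces A's per-odd-number binary-string build / mutate / re-parse by the closed-form
-- bit identity n + (((n ^ (n+1)) + 1) >> 2); equal on lists without negative odd numbers
-- (there A raises IndexError), no speed claim.

-- ===== PORT A =====
-- the while-loop of make_binary: state (result, a), 'number' shrinks by floor halving
def mbLoop (number : Int) (result : List String) (a : Int) : List String × Int :=
  if 0 < number then
    mbLoop (PySem.Int.floordiv number 2)
      (result ++ [PySem.Int.toStr (PySem.Int.mod number 2)])
      (if a = -1 ∧ PySem.Int.mod number 2 = 0 then (result.length : Int) else a)
  else (result, a)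
termination_by number.toNat
decreasing_by
  rename_i h
  rw [PySem.Int.floordiv_eq_ediv_of_pos (by omega)]
  omega

-- int(b, 2), ported by hand: exact for the nonempty '0'/'1' digit strings make_binary
-- returns (int's whitespace/sign/underscore/prefix handling is unreachable on them)
def binParse (cs : List Char) : Int :=
  cs.foldl (fun acc c => 2 * acc + (if c = '1' then 1 else 0)) 0

-- result[-1] = '0' raises IndexError on an empty result (negative odd input); pySetD is
-- the total form, faithful under Pre_ below.  result[::-1] is List.reverse (exact).
def make_binary (number : Int) : String :=
  let p := mbLoop number [] (-1)
  let result :=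
    if p.2 = -1 then (PySem.List.pySetD p.1 (-1) "0") ++ ["1"]
    else PySem.List.pySetD (PySem.List.pySetD p.1 p.2 "1") (p.2 - 1) "0"
  PySem.Str.join "" result.reverse

def solution (numbers : List Int) : List Int :=
  numbers.foldl (fun answer n =>
    if PySem.Int.mod n 2 = 0 then answer ++ [n + 1]
    else answer ++ [binParse (make_binary n).toList]) []

-- ===== PORT B =====
def solution_alt (numbers : List Int) : List Int :=
  numbers.map (fun n =>
    if PySem.Int.mod n 2 = 0 then n + 1
    else n + ((PySem.Int.bxor n (n + 1) + 1) >>> (2:Nat)))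

-- ===== PRECONDITION & SPEC =====
-- Pre_ excludes exactly the lists containing a negative odd integer: there make_binary's
-- digit list is empty and A's 'result[-1]' raises IndexError (A returns on everything else).
def Pre_solution (numbers : List Int) : Prop :=
  ∀ n ∈ numbers, PySem.Int.mod n 2 = 1 → 0 < n
instance (numbers : List Int) : Decidable (Pre_solution numbers) := by
  unfold Pre_solution; infer_instance
def pvWitness_solution : List Int := [1, 2, 3, 4, 5]

def Spec_solution (numbers : List Int) (out : List Int) : Prop := out = solution_alt numbers
instance (numbers : List Int) (out : List Int) : Decidable (Spec_solution numbers out) := by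
  unfold Spec_solution; infer_instance

-- ===== CLAIM (what is proved, stated in full; the proofs are below) =====
def Claim_equal_solution : Prop :=
  ∀ (numbers : List Int), Dom_solution numbers → Pre_solution numbers →
    Spec_solution numbers (solution numbers)
-- ===== LEMMAS AND PROOFS =====

-- LSB-first binary digits of a natural number, index of its lowest zero bit, trailing ones
def bitsN (m : Nat) : List Nat :=
  if m = 0 then [] else m % 2 :: bitsN (m / 2)
def fzN (m : Nat) : Option Nat :=
  if m = 0 then none else if m % 2 = 0 then some 0 else (fzN (m / 2)).map (· + 1)
def d2s (b : Nat) : String := PySem.Int.toStr (b : Int)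

theorem mbLoop_eq (m : Nat) : ∀ (r : List String) (a : Int),
    mbLoop (m : Int) r a =
      (r ++ (bitsN m).map d2s,
       if a = -1 then (match fzN m with
                       | some i => ((r.length + i : Nat) : Int)
                       | none => -1)
       else a) := by
  induction m using Nat.strong_induction_on with
  | _ m ih =>
    intro r a
    by_cases hm : m = 0
    · subst hm
      rw [mbLoop, bitsN, fzN]
      simp
    · have hmpos : 0 < m := Nat.pos_of_ne_zero hm
      rw [mbLoop, if_pos (by exact_mod_cast hmpos)]
      have hfd : PySem.Int.floordiv (m : Int) 2 = ((m / 2 : Nat) : Int) := by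
        exact_mod_cast PySem.Int.floordiv_natCast m 2
      have hmd : PySem.Int.mod (m : Int) 2 = ((m % 2 : Nat) : Int) := by
        exact_mod_cast PySem.Int.mod_natCast m 2
      rw [hfd, hmd, ih (m / 2) (by omega)]
      have hb : bitsN m = m % 2 :: bitsN (m / 2) := by rw [bitsN]; exact if_neg hm
      have hf : fzN m = if m % 2 = 0 then some 0 else (fzN (m / 2)).map (· + 1) := by
        rw [fzN]; exact if_neg hm
      rw [hb, hf]
      by_cases hp : m % 2 = 0
      · have hp' : ((m % 2 : Nat) : Int) = 0 := by exact_mod_cast hp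
        by_cases ha : a = -1
        · simp [hp, hp', ha, d2s, List.append_assoc]
        · simp [hp, hp', ha, d2s, List.append_assoc]
      · have hp1 : m % 2 = 1 := by omega
        have hp' : ((m % 2 : Nat) : Int) = 1 := by exact_mod_cast hp1
        by_cases ha : a = -1
        · cases hfz : fzN (m / 2) with
          | none => simp [hp, hp', ha, hfz, d2s, List.append_assoc]
          | some i =>
            simp [hp, hp', ha, hfz, d2s, List.append_assoc]
            ring
        · simp [hp, hp', ha, d2s, List.append_assoc]

def tOnes (m : Nat) : Nat :=
  if m % 2 = 1 then tOnes (m / 2) + 1 else 0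
decreasing_by rename_i h; omega
def lvalS (l : List String) : Int :=
  l.foldr (fun s acc => (if s = "1" then 1 else 0) + 2 * acc) 0

theorem fz_none_bits (m : Nat) (h : fzN m = none) :
    bitsN m = List.replicate (tOnes m) 1 := by
  induction m using Nat.strong_induction_on with
  | _ m ih =>
    by_cases hm : m = 0
    · subst hm; rw [bitsN, tOnes]; simp
    · rw [fzN, if_neg hm] at h
      by_cases hp : m % 2 = 0
      · simp [hp] at h
      · have hp1 : m % 2 = 1 := by omega
        simp [hp] at h
        rw [bitsN, if_neg hm, tOnes, if_pos hp1, ih (m / 2) (by omega) h]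
        simp [hp1, List.replicate_succ]

theorem fz_some_struct (m : Nat) : ∀ z, fzN m = some z →
    tOnes m = z ∧ ∃ rest, bitsN m = List.replicate z 1 ++ 0 :: rest := by
  induction m using Nat.strong_induction_on with
  | _ m ih =>
    intro z h
    by_cases hm : m = 0
    · subst hm; rw [fzN] at h; simp at h
    · rw [fzN, if_neg hm] at h
      by_cases hp : m % 2 = 0
      · rw [if_pos hp] at h
        simp at h
        subst h
        refine ⟨by rw [tOnes]; simp [hp], bitsN (m / 2), ?_⟩
        rw [bitsN, if_neg hm]
        simp [hp]
      · have hp1 : m % 2 = 1 := by omega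
        rw [if_neg hp] at h
        rcases Option.map_eq_some_iff.mp h with ⟨z', hz', hzz⟩
        obtain ⟨ht, rest, hrest⟩ := ih (m / 2) (by omega) z' hz'
        refine ⟨?_, rest, ?_⟩
        · rw [tOnes, if_pos hp1, ht]; omega
        · rw [bitsN, if_neg hm, hrest, hp1, ← hzz]
          simp [List.replicate_succ]

theorem bits_le_one (m : Nat) : ∀ b ∈ bitsN m, b ≤ 1 := by
  induction m using Nat.strong_induction_on with
  | _ m ih =>
    intro b hb
    by_cases hm : m = 0
    · subst hm; rw [bitsN] at hb; simp at hb
    · rw [bitsN, if_neg hm] at hb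
      rcases List.mem_cons.mp hb with h | h
      · omega
      · exact ih (m / 2) (by omega) b h

theorem lvalS_append (l1 l2 : List String) :
    lvalS (l1 ++ l2) = lvalS l1 + 2 ^ l1.length * lvalS l2 := by
  induction l1 with
  | nil => simp [lvalS]
  | cons x t ih => simp [lvalS, List.foldr] at ih ⊢; rw [ih]; ring

theorem lvalS_replicate_one (k : Nat) :
    lvalS (List.replicate k "1") = 2 ^ k - 1 := by
  induction k with
  | zero => simp [lvalS]
  | succ k ih =>
    rw [List.replicate_succ]
    simp [lvalS, List.foldr] at ih ⊢
    rw [ih]; ring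

theorem lvalS_bits (m : Nat) : lvalS ((bitsN m).map d2s) = (m : Int) := by
  induction m using Nat.strong_induction_on with
  | _ m ih =>
    by_cases hm : m = 0
    · subst hm; rw [bitsN]; simp [lvalS]
    · rw [bitsN, if_neg hm]
      simp only [List.map_cons, lvalS, List.foldr]
      have := ih (m / 2) (by omega)
      rw [show ((bitsN (m/2)).map d2s).foldr (fun s acc => (if s = "1" then 1 else 0) + 2 * acc) 0 = lvalS ((bitsN (m/2)).map d2s) from rfl, this]
      rcases Nat.mod_two_eq_zero_or_one m with hp | hp
      · rw [hp, show d2s 0 = "0" by decide, if_neg (by decide)]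
        omega
      · rw [hp, show d2s 1 = "1" by decide, if_pos rfl]
        omega

theorem intercalate_nil_cons (x : List Char) (xs : List (List Char)) :
    ([] : List Char).intercalate (x :: xs) = x ++ ([] : List Char).intercalate xs := by
  cases xs <;> simp [List.intercalate]

theorem intercalate_nil (xs : List (List Char)) :
    ([] : List Char).intercalate xs = xs.flatten := by
  induction xs with
  | nil => simp [List.intercalate]
  | cons x t ih => rw [intercalate_nil_cons, ih]; simp

theorem foldl_join01 (L : List String) (acc : Int) (h : ∀ s ∈ L, s = "0" ∨ s = "1") :
    ((L.map String.toList).flatten).foldl (fun acc c => 2 * acc + (if c = '1' then 1 else 0)) acc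
      = L.foldl (fun acc s => 2 * acc + (if s = "1" then 1 else 0)) acc := by
  induction L generalizing acc with
  | nil => simp
  | cons s t ih =>
    simp only [List.map_cons, List.flatten_cons, List.foldl_append, List.foldl_cons]
    rw [ih _ (fun x hx => h x (List.mem_cons_of_mem _ hx))]
    rcases h s (List.mem_cons_self) with hs | hs <;> subst hs <;>
      simp [show ("0" : String).toList = ['0'] from rfl, show ("1" : String).toList = ['1'] from rfl]

theorem binParse_join_rev (R : List String) (h : ∀ s ∈ R, s = "0" ∨ s = "1") :
    binParse (PySem.Str.join "" R.reverse).toList = lvalS R := by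
  rw [show (PySem.Str.join "" R.reverse).toList
      = ((R.reverse.map String.toList).flatten) by
    simp [PySem.Str.join, PySem.Chars.join, intercalate_nil]]
  unfold binParse
  rw [foldl_join01 _ _ (by intro s hs; exact h s (List.mem_reverse.mp hs))]
  rw [List.foldl_reverse]
  unfold lvalS
  congr 1
  funext s acc
  ring

theorem xorA (a : Nat) : (2 * a) ^^^ (2 * a + 1) = 1 := by
  apply Nat.eq_of_testBit_eq
  intro i
  cases i with
  | zero => simp [Nat.testBit_zero]
  | succ i =>
    rw [Nat.testBit_xor, Nat.testBit_add_one, Nat.testBit_add_one,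
        show (2 * a) / 2 = a by omega, show (2 * a + 1) / 2 = a by omega]
    simp [Nat.testBit_add_one]

theorem xorB (a : Nat) : (2 * a + 1) ^^^ (2 * a + 2) = 2 * (a ^^^ (a + 1)) + 1 := by
  apply Nat.eq_of_testBit_eq
  intro i
  cases i with
  | zero => simp [Nat.testBit_zero]; omega
  | succ i =>
    rw [Nat.testBit_xor, Nat.testBit_add_one, Nat.testBit_add_one, Nat.testBit_add_one,
        show (2 * a + 1) / 2 = a by omega, show (2 * a + 2) / 2 = a + 1 by omega,
        show (2 * (a ^^^ (a + 1)) + 1) / 2 = a ^^^ (a + 1) by omega, Nat.testBit_xor]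

theorem tOnes_pos (m : Nat) (h : m % 2 = 1) : 0 < tOnes m := by
  rw [tOnes, if_pos h]; omega

theorem xor_tOnes (m : Nat) : m ^^^ (m + 1) = 2 ^ (tOnes m + 1) - 1 := by
  induction m using Nat.strong_induction_on with
  | _ m ih =>
    rcases Nat.mod_two_eq_zero_or_one m with hp | hp
    · have ht : tOnes m = 0 := by rw [tOnes]; simp [hp]
      obtain ⟨a, ha⟩ : ∃ a, m = 2 * a := ⟨m / 2, by omega⟩
      rw [ht, ha, xorA]; norm_num
    · have ht : tOnes m = tOnes (m / 2) + 1 := by rw [tOnes, if_pos hp]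
      obtain ⟨a, ha⟩ : ∃ a, m = 2 * a + 1 := ⟨m / 2, by omega⟩
      have hd : m / 2 = a := by omega
      have iha := ih a (by omega)
      have h1 : 1 ≤ 2 ^ (tOnes a + 1) := Nat.one_le_two_pow
      have h2 : 2 ^ (tOnes a + 1 + 1) = 2 * 2 ^ (tOnes a + 1) := by ring
      rw [ht, hd, ha, show 2 * a + 1 + 1 = 2 * a + 2 by ring, xorB, iha]
      omega

theorem Bkey (m : Nat) (h : m % 2 = 1) :
    (m : Int) + ((PySem.Int.bxor (m : Int) ((m : Int) + 1) + 1) >>> (2:Nat)) =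
      (m : Int) + 2 ^ (tOnes m - 1) := by
  have ht1 : 0 < tOnes m := tOnes_pos m h
  have hc : ((m : Int) + 1) = ((m + 1 : Nat) : Int) := by push_cast; ring
  rw [hc, PySem.Int.bxor_natCast, xor_tOnes m]
  have h1 : 1 ≤ 2 ^ (tOnes m + 1) := Nat.one_le_two_pow
  have h2 : ((2 ^ (tOnes m + 1) - 1 : Nat) : Int) + 1 = ((2 ^ (tOnes m + 1) : Nat) : Int) := by
    omega
  rw [h2, ← Int.natCast_shiftRight]
  congr 1
  rw [Nat.shiftRight_eq_div_pow]
  have h3 : 2 ^ (tOnes m + 1) = 2 ^ (tOnes m - 1) * 2 ^ 2 := by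
    rw [← pow_add]
    congr 1
    omega
  rw [h3, Nat.mul_div_cancel _ (by norm_num)]
  push_cast
  ring

theorem pySetD_neg_one {α : Type} (l : List α) (v : α) (h : l ≠ []) :
    PySem.List.pySetD l (-1) v = l.set (l.length - 1) v := by
  have h1 : 1 ≤ l.length := List.length_pos_of_ne_nil h
  simp [PySem.List.pySetD, PySem.List.pySet?, PySem.List.pyIdx?, h1]

theorem set_replicate_last {α : Type} (k : Nat) (v w : α) :
    (List.replicate (k + 1) v).set k w = List.replicate k v ++ [w] := by
  induction k with
  | zero => simp
  | succ k ih =>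
    rw [List.replicate_succ, List.set_cons_succ, ih]
    simp [List.replicate_succ]

theorem Akey (m : Nat) (h : m % 2 = 1) :
    binParse (make_binary (m : Int)).toList = (m : Int) + 2 ^ (tOnes m - 1) := by
  have ht1 : 0 < tOnes m := tOnes_pos m h
  have hbits := lvalS_bits m
  unfold make_binary
  cases hfz : fzN m with
  | none =>
    simp only [mbLoop_eq m [] (-1), hfz, List.nil_append, List.length_nil, reduceIte]
    rw [fz_none_bits m hfz] at hbits ⊢
    rw [List.map_replicate, show d2s 1 = "1" by decide] at hbits ⊢
    rw [lvalS_replicate_one] at hbits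
    set t := tOnes m with ht
    have hne : List.replicate t "1" ≠ [] := by simp; omega
    rw [pySetD_neg_one _ _ hne, List.length_replicate,
        show List.replicate t "1" = List.replicate ((t-1)+1) "1" by congr 1; omega,
        set_replicate_last]
    rw [binParse_join_rev _ (by
      intro s hs
      simp [List.mem_append, List.mem_replicate] at hs
      rcases hs with ⟨-, h1⟩ | h1 | h1 <;> simp [h1])]
    rw [List.append_assoc, lvalS_append, lvalS_replicate_one, List.length_replicate]
    rw [show lvalS (["0"] ++ ["1"]) = 2 by decide]
    have hpow : (2:Int) ^ t = 2 * 2 ^ (t-1) := by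
      rw [← pow_succ']
      congr 1
      omega
    rw [hpow] at hbits
    omega
  | some z =>
    obtain ⟨htz, rest, hrest⟩ := fz_some_struct m z hfz
    have hz1 : 1 ≤ z := by omega
    simp only [mbLoop_eq m [] (-1), hfz, List.nil_append, List.length_nil, reduceIte,
      Nat.zero_add]
    rw [if_neg (show ((z : Nat) : Int) ≠ -1 by omega), htz]
    -- digits of m: z trailing ones, then a zero, then rest
    rw [hrest] at hbits ⊢
    rw [List.map_append, List.map_replicate, List.map_cons,
        show d2s 1 = "1" by decide, show d2s 0 = "0" by decide] at hbits ⊢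
    -- all remaining digit strings are "0" or "1"
    have hrest01 : ∀ s ∈ rest.map d2s, s = "0" ∨ s = "1" := by
      intro s hs
      rcases List.mem_map.mp hs with ⟨b, hb, rfl⟩
      have hb1 : b ≤ 1 := bits_le_one m b
        (by rw [hrest]; exact List.mem_append_right _ (List.mem_cons_of_mem _ hb))
      interval_cases b
      · left; decide
      · right; decide
    -- result[a] = '1' : lands on the "0" cell just past the replicate prefix
    rw [PySem.List.pySetD_natCast, List.set_append]
    simp only [List.length_replicate, lt_self_iff_false, if_false, Nat.sub_self,
      List.set_cons_zero]
    -- result[a-1] = '0' : last cell of the replicate prefix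
    rw [show ((z : Nat) : Int) - 1 = (((z - 1 : Nat)) : Int) by omega,
        PySem.List.pySetD_natCast, List.set_append]
    simp only [List.length_replicate]
    rw [if_pos (show z - 1 < z by omega),
        show List.replicate z "1" = List.replicate ((z-1)+1) "1" by congr 1; omega,
        set_replicate_last]
    rw [binParse_join_rev _ (by
      intro s hs
      simp only [List.mem_append, List.mem_cons, List.mem_replicate] at hs
      have := hrest01 s
      tauto)]
    rw [List.append_assoc, List.singleton_append, lvalS_append, lvalS_replicate_one,
        List.length_replicate]
    rw [lvalS_append, lvalS_replicate_one, List.length_replicate] at hbits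
    rw [show ∀ L, lvalS ("0" :: "1" :: L) = 2 + 4 * lvalS L from
      fun L => by simp [lvalS]; ring]
    rw [show ∀ L, lvalS ("0" :: L) = 2 * lvalS L from fun L => by simp [lvalS]] at hbits
    have hpow : (2:Int) ^ z = 2 * 2 ^ (z-1) := by
      rw [← pow_succ']
      congr 1
      omega
    rw [hpow] at hbits
    rw [← hbits]
    ring

-- ===== VERDICT (by name: the statement is the Claim_ definition above) =====
theorem solution_spec : Claim_equal_solution := by
  intro numbers _ hpre
  unfold Spec_solution solution solution_alt
  have hfun : (fun (answer : List Int) n =>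
      if PySem.Int.mod n 2 = 0 then answer ++ [n + 1]
      else answer ++ [binParse (make_binary n).toList]) =
      fun answer n => answer ++ [if PySem.Int.mod n 2 = 0 then n + 1
        else binParse (make_binary n).toList] := by
    funext ans n; split <;> rfl
  rw [hfun, PySem.List.foldl_append_singleton_eq_map, List.nil_append]
  apply List.map_congr_left
  intro n hn
  by_cases he : PySem.Int.mod n 2 = 0
  · rw [if_pos he, if_pos he]
  · have h1 : PySem.Int.mod n 2 = 1 := by rcases PySem.Int.mod_two_eq n with h | h <;> simp_all
    have hpos : 0 < n := hpre n hn h1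
    have hm : n = ((n.toNat : Nat) : Int) := by omega
    rw [if_neg he, if_neg he, hm]
    have hmod : n.toNat % 2 = 1 := by
      have h2 : PySem.Int.mod ((n.toNat : Nat) : Int) 2 = ((n.toNat % 2 : Nat) : Int) := by
        exact_mod_cast PySem.Int.mod_natCast n.toNat 2
      rw [← hm, h1] at h2
      exact_mod_cast h2.symm
    rw [Akey n.toNat hmod, Bkey n.toNat hmod]
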